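-- pv_equiv track=rewrite | github.com/lramirez89/my-projects | Licenciatura en ciencias de la computacion/Tecnicas de diseño de algoritmos/Programacion dinamica/ej7bu.py | mgn
-- ===== SOURCE A (Python) =====
-- menosinf = -9999999 #un infinito no tan chico
--
-- def mgn(p):
--     n= len(p)
--     arr= [menosinf]*(n+1)
--     arr[0]= 0
--
--     for j in range(1, n+1):
--         temp= arr[0]
--
--         arr[0]= max(arr[0], arr[1]+p[j-1] )
--
--         for i in range(1,n):
--             #mgn(j-1,c-1) ya mo modifiqué, por eso me guardé este valor en temp
--
--             #guardo arr[i] porque es el valor que necesito tener para temp en la sig iteracion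
--             temp2= arr[i]
--
--             arr[i]= max(arr[i], arr[i+1]+p[j-1], temp-p[j-1])
--
--             temp= temp2
--
--         arr[n] = max( arr[n], temp-p[j-1] )
--
--
--     return arr[0]
-- ===== SOURCE B (Python) =====
-- menosinf = -9999999  # un infinito no tan chico
--
--
-- def mgn(p):
--     # Top-down memoized recursion on (j, i) instead of A's bottom-up in-place
--     # array sweep with temp/temp2 bookkeeping.
--     n = len(p)
--     memo = {}
--
--     def f(j, i):
--         if j == 0:
--             return 0 if i == 0 else menosinf
--         key = (j, i)
--         if key in memo:
--             return memo[key]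
--         x = p[j - 1]
--         best = f(j - 1, i)
--         if i + 1 <= n:
--             best = max(best, f(j - 1, i + 1) + x)
--         if i >= 1:
--             best = max(best, f(j - 1, i - 1) - x)
--         memo[key] = best
--         return best
--
--     return f(n, 0)
-- ===== Notes on version B (the rewrite author's own statement) =====
-- stated objective: alternative
-- what changed: B replaces A's bottom-up in-place rolling-array sweeps with temp/temp2 diagonal bookkeeping by top-down memoized recursion on the subproblem (j, i), with a dict of computed subproblem values instead of an array.
import Mathlib
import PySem

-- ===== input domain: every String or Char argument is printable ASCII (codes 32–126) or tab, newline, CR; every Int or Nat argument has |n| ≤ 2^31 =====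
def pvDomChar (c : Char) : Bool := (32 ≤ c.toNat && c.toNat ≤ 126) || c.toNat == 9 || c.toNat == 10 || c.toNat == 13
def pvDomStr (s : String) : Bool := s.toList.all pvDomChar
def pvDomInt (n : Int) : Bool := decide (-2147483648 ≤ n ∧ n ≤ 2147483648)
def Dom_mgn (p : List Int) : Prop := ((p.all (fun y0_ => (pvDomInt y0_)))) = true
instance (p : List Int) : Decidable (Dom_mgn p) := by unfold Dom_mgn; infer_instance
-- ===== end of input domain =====

-- B replaces A's bottom-up in-place array sweeps (with temp/temp2 diagonal bookkeeping)
-- by top-down memoized recursion on the subproblem (j, i); same values, same O(n^2) cost.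

def menosinf : Int := -9999999

-- ===== PORT A =====
-- A's inner loop body: state is (arr, temp); all indices are in range (1 ≤ i ≤ n-1,
-- arr has length n+1), so pyGetD/pySetD are exact ports of arr[i] / arr[i] = v.
def mgnInnerStep (x : Int) (st : List Int × Int) (i : Int) : List Int × Int :=
  let temp2 := PySem.List.pyGetD st.1 i 0
  (PySem.List.pySetD st.1 i
    (max (max (PySem.List.pyGetD st.1 i 0) (PySem.List.pyGetD st.1 (i + 1) 0 + x)) (st.2 - x)),
   temp2)

-- one iteration of A's outer loop, x = p[j-1]
def mgnOuterStep (n : Nat) (x : Int) (arr : List Int) : List Int :=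
  let temp := PySem.List.pyGetD arr 0 0
  let arr1 := PySem.List.pySetD arr 0
    (max (PySem.List.pyGetD arr 0 0) (PySem.List.pyGetD arr 1 0 + x))
  let st := (PySem.List.pyRange 1 (n : Int) 1).foldl (mgnInnerStep x) (arr1, temp)
  PySem.List.pySetD st.1 (n : Int)
    (max (PySem.List.pyGetD st.1 (n : Int) 0) (st.2 - x))

def mgn (p : List Int) : Int :=
  let n := p.length
  let arr := PySem.List.pySetD (PySem.List.pyRepeat [menosinf] ((n : Int) + 1)) 0 0
  let arr := (PySem.List.pyRange 1 ((n : Int) + 1) 1).foldl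
    (fun arr j => mgnOuterStep n (PySem.List.pyGetD p (j - 1) 0) arr) arr
  PySem.List.pyGetD arr 0 0

-- ===== PORT B =====
-- B's recursive f(j, i) with the memo dict threaded through (keys (j, i), j ≥ 1);
-- all indices j-1 into p are in range, so pyGetD is an exact port of p[j-1].
def mgnAltF (p : List Int) (n : Nat) : Nat → Int → PySem.Dict (Int × Int) Int → Int × PySem.Dict (Int × Int) Int
  | 0, i, memo => ((if i == 0 then (0 : Int) else menosinf), memo)
  | j+1, i, memo =>
    match memo.get? ((j : Int) + 1, i) with
    | some v => (v, memo)
    | none =>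
      let x := PySem.List.pyGetD p ((j : Int) + 1 - 1) 0
      let r0 := mgnAltF p n j i memo
      let r1 := if i + 1 ≤ (n : Int) then
          let t := mgnAltF p n j (i + 1) r0.2
          (max r0.1 (t.1 + x), t.2)
        else r0
      let r2 := if 1 ≤ i then
          let t := mgnAltF p n j (i - 1) r1.2
          (max r1.1 (t.1 - x), t.2)
        else r1
      (r2.1, r2.2.insert ((j : Int) + 1, i) r2.1)

def mgn_alt (p : List Int) : Int :=
  (mgnAltF p p.length p.length 0 PySem.Dict.empty).1

-- ===== PRECONDITION & SPEC =====
def Spec_mgn (p : List Int) (out : Int) : Prop := out = mgn_alt p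
instance (p : List Int) (out : Int) : Decidable (Spec_mgn p out) := by unfold Spec_mgn; infer_instance

-- ===== CLAIM (what is proved, stated in full; the proofs are below) =====
def Claim_equal_mgn : Prop := ∀ (p : List Int), Dom_mgn p → Spec_mgn p (mgn p)

-- ===== LEMMAS AND PROOFS =====

-- the value of cell i of the next row, in terms of the previous row
def gfun (prev : List Int) (x : Int) (n i : Nat) : Int :=
  let v := prev.getD i 0
  let v := if i + 1 ≤ n then max v (prev.getD (i + 1) 0 + x) else v
  if 1 ≤ i then max v (prev.getD (i - 1) 0 - x) else v

-- one whole DP row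
def rowStep (n : Nat) (x : Int) (arr : List Int) : List Int :=
  (List.range (n + 1)).map (gfun arr x n)

-- row j of the DP table for input p
def dpRow (p : List Int) (j : Nat) : List Int :=
  (p.take j).foldl (fun arr x => rowStep p.length x arr)
    ((0 : Int) :: List.replicate p.length menosinf)

-- B's recursion, memo stripped away
def Fp (p : List Int) (n : Nat) : Nat → Int → Int
  | 0, i => if i = 0 then 0 else menosinf
  | j+1, i =>
    let x := p.getD j 0
    let v := Fp p n j i
    let v := if i + 1 ≤ (n : Int) then max v (Fp p n j (i + 1) + x) else v
    if 1 ≤ i then max v (Fp p n j (i - 1) - x) else v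

-- memo invariant: every stored entry is the true subproblem value
def MInv (p : List Int) (n : Nat) (memo : PySem.Dict (Int × Int) Int) : Prop :=
  ∀ a b v, memo.get? (a, b) = some v → v = Fp p n a.toNat b ∧ 1 ≤ a

theorem memoF (p : List Int) (n : Nat) :
    ∀ j i memo, MInv p n memo →
      (mgnAltF p n j i memo).1 = Fp p n j i ∧ MInv p n (mgnAltF p n j i memo).2 := by
  intro j
  induction j with
  | zero =>
    intro i memo h
    refine ⟨?_, by simpa [mgnAltF] using h⟩
    simp only [mgnAltF, Fp]
    by_cases hi : i = 0 <;> simp [hi]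
  | succ j ih =>
    intro i memo h
    simp only [mgnAltF]
    cases hm : memo.get? ((j : Int) + 1, i) with
    | some v =>
      obtain ⟨hv, -⟩ := h _ _ _ hm
      have ht : ((j : Int) + 1).toNat = j + 1 := by omega
      rw [ht] at hv
      exact ⟨hv, h⟩
    | none =>
      have hx : PySem.List.pyGetD p ((j : Int) + 1 - 1) 0 = p.getD j 0 := by
        rw [show (j : Int) + 1 - 1 = ((j : Nat) : Int) from by ring, PySem.List.pyGetD_natCast]
      obtain ⟨e0, I0⟩ := ih i memo h
      -- the value and invariant after the two conditional recursive calls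
      have step1 : ∀ (r : Int × PySem.Dict (Int × Int) Int),
          r.1 = (if i + 1 ≤ (n : Int) then
                   max (Fp p n j i) (Fp p n j (i + 1) + p.getD j 0)
                 else Fp p n j i) →
          MInv p n r.2 →
          (if 1 ≤ i then
             let t := mgnAltF p n j (i - 1) r.2
             (max r.1 (t.1 - PySem.List.pyGetD p ((j : Int) + 1 - 1) 0), t.2)
           else r).1 =
            Fp p n (j + 1) i ∧
          MInv p n (if 1 ≤ i then
             let t := mgnAltF p n j (i - 1) r.2
             (max r.1 (t.1 - PySem.List.pyGetD p ((j : Int) + 1 - 1) 0), t.2)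
           else r).2 := by
        intro r hr1 hr2
        by_cases hc2 : 1 ≤ i
        · obtain ⟨e2, I2⟩ := ih (i - 1) r.2 hr2
          simp only [if_pos hc2, e2, hx, hr1]
          exact ⟨by simp [Fp, hc2], I2⟩
        · simp only [if_neg hc2, hr1]
          exact ⟨by simp [Fp, hc2], hr2⟩
      have main : ((if i + 1 ≤ (n : Int) then
             let t := mgnAltF p n j (i + 1) (mgnAltF p n j i memo).2
             (max (mgnAltF p n j i memo).1 (t.1 + PySem.List.pyGetD p ((j : Int) + 1 - 1) 0), t.2)
           else mgnAltF p n j i memo)).1 =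
            (if i + 1 ≤ (n : Int) then
               max (Fp p n j i) (Fp p n j (i + 1) + p.getD j 0)
             else Fp p n j i) ∧
          MInv p n ((if i + 1 ≤ (n : Int) then
             let t := mgnAltF p n j (i + 1) (mgnAltF p n j i memo).2
             (max (mgnAltF p n j i memo).1 (t.1 + PySem.List.pyGetD p ((j : Int) + 1 - 1) 0), t.2)
           else mgnAltF p n j i memo)).2 := by
        by_cases hc1 : i + 1 ≤ (n : Int)
        · obtain ⟨e1, I1⟩ := ih (i + 1) (mgnAltF p n j i memo).2 I0
          simp only [if_pos hc1, e0, e1, hx]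
          exact ⟨trivial, I1⟩
        · simp only [if_neg hc1, e0]
          exact ⟨trivial, I0⟩
      obtain ⟨hval, hinv⟩ := step1 _ main.1 main.2
      refine ⟨hval, ?_⟩
      intro a b v hv
      rw [PySem.Dict.get?_insert] at hv
      by_cases hk : (a, b) = ((j : Int) + 1, i)
      · rw [if_pos hk] at hv
        obtain ⟨rfl, rfl⟩ := Prod.mk.injEq .. ▸ hk
        refine ⟨?_, by omega⟩
        have ht : ((j : Int) + 1).toNat = j + 1 := by omega
        rw [ht, ← hval, ← Option.some_inj.mp hv]
      · rw [if_neg hk] at hv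
        exact hinv _ _ _ hv

-- ====== A side (array sweep = rowStep) ======

-- the state of A's array after the first k cells have been overwritten
def mix (arr : List Int) (x : Int) (n k : Nat) : List Int :=
  (List.range (n + 1)).map (fun i => if i < k then gfun arr x n i else arr.getD i 0)

theorem getD_mix (arr : List Int) (x : Int) (n k i : Nat) (h : i < n + 1) :
    (mix arr x n k).getD i 0 = if i < k then gfun arr x n i else arr.getD i 0 := by
  simp only [mix]
  rw [PySem.List.getD_map_range _ _ _ _ h]

theorem mix_set (arr : List Int) (x : Int) (n k : Nat) (hk : k < n + 1) :
    (mix arr x n k).set k (gfun arr x n k) = mix arr x n (k + 1) := by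
  apply List.ext_getElem
  · simp [mix]
  · intro i hi hi2
    simp only [mix, List.getElem_set, List.getElem_map, List.getElem_range]
    rcases eq_or_ne i k with rfl | hne
    · simp
    · have h1 : (i < k + 1) ↔ i < k := by omega
      simp [Ne.symm hne, h1]

theorem mix_zero (arr : List Int) (x : Int) (n : Nat) (h : arr.length = n + 1) :
    mix arr x n 0 = arr := by
  apply List.ext_getElem
  · simp [mix, h]
  · intro i hi hi2
    simp only [mix, List.getElem_map, List.getElem_range, Nat.not_lt_zero, if_false]
    rw [List.getD_eq_getElem arr 0 hi2]

theorem mix_full (arr : List Int) (x : Int) (n : Nat) :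
    mix arr x n (n + 1) = rowStep n x arr := by
  unfold mix rowStep
  apply List.map_congr_left
  intro i hi
  rw [if_pos (List.mem_range.mp hi)]

theorem inner_loop (arr : List Int) (x : Int) (n : Nat) :
    ∀ d k, 1 ≤ k → k + d = n →
    (PySem.List.pyRange (k : Int) (n : Int) 1).foldl (mgnInnerStep x)
        (mix arr x n k, arr.getD (k - 1) 0) =
      (mix arr x n n, arr.getD (n - 1) 0) := by
  intro d
  induction d with
  | zero =>
    intro k hk hkn
    have : k = n := by omega
    subst this
    simp [PySem.List.pyRange]
  | succ d ih =>
    intro k hk hkn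
    rw [PySem.List.pyRange_one_cons (by exact_mod_cast Nat.lt_of_lt_of_le (by omega) (le_refl n))]
    rw [List.foldl_cons]
    have hstep : mgnInnerStep x (mix arr x n k, arr.getD (k - 1) 0) (k : Int) =
        (mix arr x n (k + 1), arr.getD ((k + 1) - 1) 0) := by
      unfold mgnInnerStep
      have e2 : ((k : Int)) + 1 = ((k + 1 : Nat) : Int) := by push_cast; ring
      simp only [e2, PySem.List.pyGetD_natCast, PySem.List.pySetD_natCast]
      rw [getD_mix arr x n k k (by omega), getD_mix arr x n k (k + 1) (by omega)]
      rw [if_neg (lt_irrefl k), if_neg (by omega : ¬ k + 1 < k)]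
      have hg : gfun arr x n k =
          max (max (arr.getD k 0) (arr.getD (k + 1) 0 + x)) (arr.getD (k - 1) 0 - x) := by
        simp [gfun, hk, Nat.succ_le_of_lt (show k < n by omega)]
      rw [← hg, mix_set arr x n k (by omega)]
      simp
    rw [hstep]
    have e3 : ((k : Int)) + 1 = ((k + 1 : Nat) : Int) := by push_cast; ring
    rw [e3]
    exact ih (k + 1) (by omega) (by omega)

theorem outer_eq (arr : List Int) (x : Int) (n : Nat) (h : arr.length = n + 1) (hn : 1 ≤ n) :
    mgnOuterStep n x arr = rowStep n x arr := by
  simp only [mgnOuterStep]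
  have h0 : PySem.List.pyGetD arr (0 : Int) 0 = arr.getD 0 0 := PySem.List.pyGetD_zero arr 0
  have hset : PySem.List.pySetD arr (0 : Int)
      (max (PySem.List.pyGetD arr 0 0) (PySem.List.pyGetD arr 1 0 + x)) = mix arr x n 1 := by
    have hone : PySem.List.pyGetD arr (1 : Int) 0 = arr.getD 1 0 := by
      exact_mod_cast PySem.List.pyGetD_natCast arr 1 0
    have hg0 : gfun arr x n 0 = max (arr.getD 0 0) (arr.getD 1 0 + x) := by
      simp [gfun, hn]
    rw [h0, hone, show (0 : Int) = ((0 : Nat) : Int) from rfl, PySem.List.pySetD_natCast]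
    push_cast
    rw [← hg0]
    have := mix_set arr x n 0 (by omega)
    rw [mix_zero arr x n h] at this
    exact this
  rw [hset, h0]
  have hfold := inner_loop arr x n (n - 1) 1 (le_refl 1) (by omega)
  simp only [Nat.cast_one, Nat.sub_self] at hfold
  rw [hfold]
  have hgn : PySem.List.pyGetD (mix arr x n n) (n : Int) 0 = arr.getD n 0 := by
    rw [PySem.List.pyGetD_natCast, getD_mix arr x n n n (by omega), if_neg (lt_irrefl n)]
  rw [hgn, PySem.List.pySetD_natCast]
  have hgfn : gfun arr x n n = max (arr.getD n 0) (arr.getD (n - 1) 0 - x) := by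
    simp [gfun, hn, Nat.not_succ_le_self n]
  rw [← hgfn, mix_set arr x n n (by omega), mix_full]

theorem fold_cong (n : Nat) (l : List Int) (arr : List Int) (h : arr.length = n + 1)
    (hn : 1 ≤ n) :
    l.foldl (fun a x => mgnOuterStep n x a) arr = l.foldl (fun a x => rowStep n x a) arr := by
  induction l generalizing arr with
  | nil => rfl
  | cons y t ih =>
    simp only [List.foldl_cons]
    rw [outer_eq arr y n h hn, ih _ (by simp [rowStep])]

theorem range_shift (F : List Int → Int → List Int) (p : List Int) (init : List Int) :
    (PySem.List.pyRange 1 ((p.length : Int) + 1) 1).foldl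
        (fun acc j => F acc (PySem.List.pyGetD p (j - 1) 0)) init =
      p.foldl F init := by
  induction p using List.reverseRecOn with
  | nil => simp [PySem.List.pyRange]
  | append_singleton q y ih =>
    have hlen : ((q ++ [y]).length : Int) + 1 = ((q.length : Int) + 1) + 1 := by
      simp only [List.length_append, List.length_cons, List.length_nil]
      push_cast
      ring
    rw [hlen, PySem.List.pyRange_one_succ_right (by omega), List.foldl_append,
      List.foldl_append]
    have hcong : (PySem.List.pyRange 1 ((q.length : Int) + 1) 1).foldl
        (fun acc j => F acc (PySem.List.pyGetD (q ++ [y]) (j - 1) 0)) init =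
        (PySem.List.pyRange 1 ((q.length : Int) + 1) 1).foldl
        (fun acc j => F acc (PySem.List.pyGetD q (j - 1) 0)) init := by
      apply PySem.List.foldl_congr_mem
      intro acc j hj
      have hj' := PySem.List.mem_pyRange_one.mp hj
      have e1 : j - 1 = (((j - 1).toNat : Nat) : Int) := by omega
      rw [e1, PySem.List.pyGetD_natCast, PySem.List.pyGetD_natCast,
        List.getD_append _ _ _ _ (by omega)]
    rw [hcong, ih]
    simp only [List.foldl_cons, List.foldl_nil]
    have e2 : (q.length : Int) + 1 - 1 = ((q.length : Nat) : Int) := by ring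
    rw [e2, PySem.List.pyGetD_natCast]
    simp

theorem init_arr (n : Nat) :
    PySem.List.pySetD (PySem.List.pyRepeat [menosinf] ((n : Int) + 1)) 0 0 =
      (0 : Int) :: List.replicate n menosinf := by
  rw [PySem.List.pyRepeat_singleton,
    show (0 : Int) = ((0 : Nat) : Int) from rfl, PySem.List.pySetD_natCast]
  have : ((n : Int) + 1).toNat = n + 1 := by omega
  rw [this, List.replicate_succ]
  rfl

-- ====== B side (Fp = dpRow) ======

theorem foldl_rowStep_length (n : Nat) (l : List Int) (arr : List Int)
    (h : arr.length = n + 1) :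
    (l.foldl (fun a x => rowStep n x a) arr).length = n + 1 := by
  induction l generalizing arr with
  | nil => simpa using h
  | cons y t ih => simpa using ih _ (by simp [rowStep])

theorem length_dpRow (p : List Int) (j : Nat) : (dpRow p j).length = p.length + 1 := by
  unfold dpRow
  exact foldl_rowStep_length _ _ _ (by simp)

theorem dpRow_succ (p : List Int) (j : Nat) (hj : j < p.length) :
    dpRow p (j + 1) = rowStep p.length (p.getD j 0) (dpRow p j) := by
  unfold dpRow
  rw [List.take_add_one, List.getElem?_eq_getElem hj]
  rw [List.foldl_append]
  simp [List.getD, List.getElem?_eq_getElem hj]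

theorem getD_rowStep (n : Nat) (x : Int) (prev : List Int) (i : Nat) (h : i < n + 1) :
    (rowStep n x prev).getD i 0 = gfun prev x n i := by
  unfold rowStep
  rw [PySem.List.getD_map_range _ _ _ _ h]

theorem Fp_eq_dpRow (p : List Int) (j : Nat) (hj : j ≤ p.length) :
    ∀ i : Nat, i ≤ p.length → Fp p p.length j (i : Int) = (dpRow p j).getD i 0 := by
  induction j with
  | zero =>
    intro i hi
    have hd : dpRow p 0 = (0 : Int) :: List.replicate p.length menosinf := by
      simp [dpRow]
    rw [hd]
    rcases i with _ | i
    · simp [Fp]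
    · simp only [Fp]
      rw [if_neg (by push_cast; omega), List.getD_cons_succ,
        List.getD_eq_getElem _ _ (by simpa using by omega), List.getElem_replicate]
  | succ j ih =>
    intro i hi
    have hj' : j < p.length := by omega
    rw [dpRow_succ p j hj', getD_rowStep _ _ _ _ (by omega)]
    have hlen := length_dpRow p j
    simp only [Fp, gfun]
    have hjle : j ≤ p.length := le_of_lt hj'
    have h0 : Fp p p.length j (i : Int) = (dpRow p j).getD i 0 := ih hjle i hi
    by_cases hc2 : 1 ≤ i
    · have h2 : Fp p p.length j ((i : Int) - 1) = (dpRow p j).getD (i - 1) 0 := by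
        rw [show (i : Int) - 1 = ((i - 1 : Nat) : Int) from by omega]
        exact ih hjle (i - 1) (by omega)
      by_cases hc1 : i + 1 ≤ p.length
      · have h1 : Fp p p.length j ((i : Int) + 1) = (dpRow p j).getD (i + 1) 0 := by
          rw [show (i : Int) + 1 = ((i + 1 : Nat) : Int) from by push_cast; ring]
          exact ih hjle (i + 1) hc1
        simp [hc1, hc2, h0, h1, h2, (by exact_mod_cast hc1 : (i : Int) + 1 ≤ (p.length : Int)),
          (by exact_mod_cast hc2 : (1 : Int) ≤ (i : Int))]
      · simp [hc1, hc2, h0, h2, (by exact_mod_cast hc1 : ¬ (i : Int) + 1 ≤ (p.length : Int)),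
          (by exact_mod_cast hc2 : (1 : Int) ≤ (i : Int))]
    · have hi0 : i = 0 := by omega
      subst hi0
      by_cases hc1 : 0 + 1 ≤ p.length
      · have h1 : Fp p p.length j (1 : Int) = (dpRow p j).getD 1 0 := by
          simpa using ih hjle 1 (by omega)
        simp only [Nat.cast_zero] at h0 ⊢
        simp [hc1, h0, h1]
      · simp only [Nat.cast_zero] at h0 ⊢
        simp [hc1, h0]

-- ===== VERDICT (by name: the statement is the Claim_ definition above) =====
theorem mgn_spec : Claim_equal_mgn := by
  intro p _
  unfold Spec_mgn mgn mgn_alt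
  simp only []
  have hB : (mgnAltF p p.length p.length 0 PySem.Dict.empty).1 = Fp p p.length p.length 0 :=
    (memoF p p.length p.length 0 PySem.Dict.empty
      (by intro a b v hv; simp [PySem.Dict.get?_empty] at hv)).1
  rcases p with _ | ⟨y, t⟩
  · rfl
  · have hn : 1 ≤ (y :: t).length := by simp
    rw [init_arr, range_shift (fun arr x => mgnOuterStep (y :: t).length x arr),
      fold_cong _ _ _ (by simp) hn]
    rw [PySem.List.pyGetD_zero, hB]
    have hF := Fp_eq_dpRow (y :: t) (y :: t).length (le_refl _) 0 (by omega)
    rw [Nat.cast_zero] at hF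
    rw [hF]
    unfold dpRow
    rw [List.take_length]
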